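-- pv_equiv track=rewrite | github.com/0hardik1/practicode | api-server/app/services/python_intellisense.py | _identifier_at_position
-- ===== SOURCE A (Python) =====
-- def _line_text(code: str, line: int) -> str:
--     lines = code.splitlines() or [""]
--     if line > len(lines):
--         return ""
--     return lines[line - 1]
--
-- def _identifier_at_position(code: str, line: int, column: int) -> str | None:
--     line_text = _line_text(code, line)
--     if not line_text:
--         return None
--
--     index = min(max(column - 1, 0), len(line_text) - 1)
--     if not (line_text[index].isalnum() or line_text[index] == "_"):
--         if index > 0 and (line_text[index - 1].isalnum() or line_text[index - 1] == "_"):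
--             index -= 1
--         else:
--             return None
--
--     start = index
--     while start > 0 and (line_text[start - 1].isalnum() or line_text[start - 1] == "_"):
--         start -= 1
--
--     end = index + 1
--     while end < len(line_text) and (line_text[end].isalnum() or line_text[end] == "_"):
--         end += 1
--
--     return line_text[start:end]
-- ===== SOURCE B (Python) =====
-- def _line_text(code: str, line: int) -> str:
--     lines = code.splitlines() or [""]
--     if line > len(lines):
--         return ""
--     return lines[line - 1]
--
-- def _is_word(c: str) -> bool:
--     return c.isalnum() or c == "_"
--
-- def _identifier_at_position(code: str, line: int, column: int) -> str | None:
--     line_text = _line_text(code, line)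
--     if not line_text:
--         return None
--
--     index = min(max(column - 1, 0), len(line_text) - 1)
--     if not _is_word(line_text[index]):
--         if index > 0 and _is_word(line_text[index - 1]):
--             index -= 1
--         else:
--             return None
--
--     # one left-to-right pass grouping maximal word-character runs into spans
--     spans = []
--     run_start = None
--     for i, c in enumerate(line_text):
--         if _is_word(c):
--             if run_start is None:
--                 run_start = i
--         elif run_start is not None:
--             spans.append((run_start, i))
--             run_start = None
--     if run_start is not None:
--         spans.append((run_start, len(line_text)))
--
--     for s, e in spans:
--         if s <= index < e:
--             return line_text[s:e]
--     return None
-- ===== Notes on version B (the rewrite author's own statement) =====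
-- stated objective: alternative
-- what changed: A expands left and right from the cursor with two while loops; B makes one left-to-right pass grouping maximal word-character runs into (start, end) spans and returns the text of the unique span containing the (identically adjusted) cursor index.
import Mathlib
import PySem

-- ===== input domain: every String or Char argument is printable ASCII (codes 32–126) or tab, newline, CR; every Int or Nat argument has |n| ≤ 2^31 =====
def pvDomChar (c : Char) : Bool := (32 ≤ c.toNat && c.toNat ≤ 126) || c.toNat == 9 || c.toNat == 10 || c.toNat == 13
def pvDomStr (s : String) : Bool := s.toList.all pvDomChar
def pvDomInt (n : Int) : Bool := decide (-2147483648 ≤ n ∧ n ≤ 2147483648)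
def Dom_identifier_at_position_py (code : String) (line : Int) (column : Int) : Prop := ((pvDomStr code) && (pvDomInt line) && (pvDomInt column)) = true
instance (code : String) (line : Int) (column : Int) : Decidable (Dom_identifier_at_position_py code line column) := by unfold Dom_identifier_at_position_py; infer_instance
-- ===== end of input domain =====

-- B replaces A's two expand-from-the-cursor while loops by one left-to-right pass grouping
-- maximal word-character runs into spans and picking the span containing the cursor (objective:
-- alternative decomposition, same cost).

-- shared helpers: both Pythons contain the identical `_line_text` and word-character test
def pvWord (c : Char) : Bool := PySem.Chars.isalnum c || c == '_'

def pvLinesOf (code : String) : List (List Char) :=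
  let ls := PySem.Chars.splitlines code.toList
  if ls.isEmpty then [[]] else ls

def pvLineText (code : String) (line : Int) : List Char :=
  let lines := pvLinesOf code
  if (lines.length : Int) < line then [] else PySem.List.pyGetD lines (line - 1) []

-- ===== PORT A =====
def pvStartLoop (cs : List Char) : Nat → Nat
  | 0 => 0
  | s + 1 => if pvWord (cs.getD s ' ') then pvStartLoop cs s else s + 1

def pvEndLoop (cs : List Char) (e : Nat) : Nat :=
  if e < cs.length ∧ pvWord (cs.getD e ' ') then pvEndLoop cs (e + 1) else e
termination_by cs.length - e
decreasing_by omega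

def identifier_at_position_py (code : String) (line : Int) (column : Int) : Option String :=
  let cs := pvLineText code line
  if cs.length = 0 then none
  else
    let index : Int := min (max (column - 1) 0) ((cs.length : Int) - 1)
    let idx? : Option Int :=
      if ¬ pvWord (PySem.List.pyGetD cs index ' ') then
        if 0 < index ∧ pvWord (PySem.List.pyGetD cs (index - 1) ' ') then some (index - 1)
        else none
      else some index
    match idx? with
    | none => none
    | some index =>
      let start := pvStartLoop cs index.toNat
      let stop := pvEndLoop cs (index.toNat + 1)
      some (String.ofList (PySem.List.slice cs (some (start : Int)) (some (stop : Int))))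

-- ===== PORT B =====
def pvSpanStep (st : List (Int × Int) × Option Int) (p : Int × Char) : List (Int × Int) × Option Int :=
  if pvWord p.2 then
    match st.2 with
    | none => (st.1, some p.1)
    | some s => (st.1, some s)
  else
    match st.2 with
    | none => st
    | some s => (st.1 ++ [(s, p.1)], none)

def pvSpans (cs : List Char) : List (Int × Int) :=
  let st := (PySem.List.enumerate cs 0).foldl pvSpanStep ([], none)
  match st.2 with
  | none => st.1
  | some s => st.1 ++ [(s, (cs.length : Int))]

def identifier_at_position_py_alt (code : String) (line : Int) (column : Int) : Option String :=
  let cs := pvLineText code line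
  if cs.length = 0 then none
  else
    let index : Int := min (max (column - 1) 0) ((cs.length : Int) - 1)
    let idx? : Option Int :=
      if ¬ pvWord (PySem.List.pyGetD cs index ' ') then
        if 0 < index ∧ pvWord (PySem.List.pyGetD cs (index - 1) ' ') then some (index - 1)
        else none
      else some index
    match idx? with
    | none => none
    | some index =>
      match (pvSpans cs).find? (fun p => decide (p.1 ≤ index) && decide (index < p.2)) with
      | some (s, e) => some (String.ofList (PySem.List.slice cs (some s) (some e)))
      | none => none

-- ===== PRECONDITION & SPEC =====
-- Pre_ excludes exactly the inputs where Python's `lines[line - 1]` raises IndexError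
-- (line below the negative-wraparound range while not exceeding the number of lines).
def Pre_identifier_at_position_py (code : String) (line : Int) (column : Int) : Prop :=
  ((pvLinesOf code).length : Int) < line ∨ PySem.Raise.InRange (pvLinesOf code).length (line - 1)
instance (code : String) (line : Int) (column : Int) : Decidable (Pre_identifier_at_position_py code line column) := by unfold Pre_identifier_at_position_py; infer_instance

def pvWitness_identifier_at_position_py : String × Int × Int := ("foo bar", 1, 6)

def Spec_identifier_at_position_py (code : String) (line : Int) (column : Int) (out : Option String) : Prop := out = identifier_at_position_py_alt code line column
instance (code : String) (line : Int) (column : Int) (out : Option String) : Decidable (Spec_identifier_at_position_py code line column out) := by unfold Spec_identifier_at_position_py; infer_instance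

-- ===== CLAIM (what is proved, stated in full; the proofs are below) =====
def Claim_equal_identifier_at_position_py : Prop := ∀ (code : String) (line : Int) (column : Int), Dom_identifier_at_position_py code line column → Pre_identifier_at_position_py code line column → Spec_identifier_at_position_py code line column (identifier_at_position_py code line column)

-- ===== LEMMAS AND PROOFS =====

def pvW (cs : List Char) (j : Nat) : Bool := pvWord (cs.getD j ' ')

theorem pvW_lt {cs : List Char} {j : Nat} (h : pvW cs j = true) : j < cs.length := by
  by_contra hn
  simp [pvW, List.getD_eq_getElem?_getD, List.getElem?_eq_none (by omega : cs.length ≤ j)] at h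
  simp [pvWord] at h
  exact absurd h (by decide)

def pvRuns : List Char → Nat → Option Nat → List (Nat × Nat)
  | [], _, none => []
  | [], k, some s => [(s, k)]
  | c :: suf, k, none => if pvWord c then pvRuns suf (k+1) (some k) else pvRuns suf (k+1) none
  | c :: suf, k, some s => if pvWord c then pvRuns suf (k+1) (some s) else (s, k) :: pvRuns suf (k+1) none

theorem spans_eq_runs : ∀ (suf : List Char) (k : Nat) (acc : List (Int × Int)) (run : Option Nat),
    (let st := (PySem.List.enumerate suf (k : Int)).foldl pvSpanStep (acc, run.map (fun n => (n : Int)));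
     match st.2 with | none => st.1 | some s => st.1 ++ [(s, ((k + suf.length : Nat) : Int))])
    = acc ++ (pvRuns suf k run).map (fun p => ((p.1 : Int), (p.2 : Int))) := by
  intro suf
  induction suf with
  | nil => intro k acc run; cases run <;> simp [pvRuns, PySem.List.enumerate]
  | cons c rest ih =>
    intro k acc run
    rw [PySem.List.enumerate_cons]
    cases run with
    | none =>
      by_cases hw : pvWord c
      · simp only [List.foldl_cons, pvSpanStep, hw, if_pos, pvRuns]
        have := ih (k+1) acc (some k)
        simpa [hw, Nat.add_comm, Nat.add_assoc, Nat.add_left_comm] using this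
      · simp only [List.foldl_cons, pvSpanStep, hw, pvRuns]
        have := ih (k+1) acc none
        simpa [hw, Nat.add_comm, Nat.add_assoc, Nat.add_left_comm] using this
    | some s =>
      by_cases hw : pvWord c
      · simp only [List.foldl_cons, pvSpanStep, hw, if_pos, pvRuns]
        have := ih (k+1) acc (some s)
        simpa [hw, Nat.add_comm, Nat.add_assoc, Nat.add_left_comm] using this
      · simp only [List.foldl_cons, pvSpanStep, hw, pvRuns]
        have := ih (k+1) (acc ++ [((s:Int), (k:Int))]) none
        simpa [hw, Nat.add_comm, Nat.add_assoc, Nat.add_left_comm] using this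

theorem pvSpans_eq (cs : List Char) :
    pvSpans cs = (pvRuns cs 0 none).map (fun p => ((p.1 : Int), (p.2 : Int))) := by
  have := spans_eq_runs cs 0 [] none
  simpa [pvSpans] using this
def pvMaxRun (cs : List Char) (a b : Nat) : Prop :=
  a < b ∧ b ≤ cs.length ∧ (∀ j, a ≤ j → j < b → pvW cs j = true) ∧
    (a = 0 ∨ pvW cs (a - 1) = false) ∧ (b = cs.length ∨ pvW cs b = false)

theorem pvW_of_drop {cs rest : List Char} {c : Char} {k : Nat} (h : cs.drop k = c :: rest) :
    pvW cs k = pvWord c := by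
  have h0 : cs[k]? = some c := by
    have h' : (List.drop k cs)[0]? = some c := by rw [h]; rfl
    rw [List.getElem?_drop] at h'; simpa using h'
  simp [pvW, List.getD_eq_getElem?_getD, h0]

theorem drop_succ_of_drop {cs rest : List Char} {c : Char} {k : Nat} (h : cs.drop k = c :: rest) :
    cs.drop (k + 1) = rest := by
  have h' : List.drop (k + 1) cs = List.drop 1 (List.drop k cs) := by
    rw [List.drop_drop, Nat.add_comm]
  rw [h', h]; rfl

theorem runs_sound : ∀ (suf : List Char) (k : Nat) (run : Option Nat) (cs : List Char),
    suf = cs.drop k →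
    (match run with
     | none => k = 0 ∨ pvW cs (k - 1) = false
     | some s => s < k ∧ (∀ j, s ≤ j → j < k → pvW cs j = true) ∧ (s = 0 ∨ pvW cs (s - 1) = false)) →
    ∀ a b, (a, b) ∈ pvRuns suf k run → pvMaxRun cs a b := by
  intro suf
  induction suf with
  | nil =>
    intro k run cs hd hinv a b hm
    cases run with
    | none => simp [pvRuns] at hm
    | some s =>
      simp [pvRuns] at hm
      obtain ⟨hs, hw, hb⟩ := hinv
      have hkl : k ≤ cs.length := by
        have := pvW_lt (hw (k-1) (by omega) (by omega)); omega
      have hlk : cs.length ≤ k := by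
        have := List.drop_eq_nil_iff.mp hd.symm; omega
      obtain ⟨rfl, rfl⟩ := hm
      exact ⟨hs, hkl, hw, hb, Or.inl (by omega)⟩
  | cons c rest ih =>
    intro k run cs hd hinv a b hm
    have hwc : pvW cs k = pvWord c := pvW_of_drop hd.symm
    have hrest : rest = cs.drop (k + 1) := (drop_succ_of_drop hd.symm).symm
    cases run with
    | none =>
      by_cases hw : pvWord c
      · rw [pvRuns, if_pos hw] at hm
        refine ih (k+1) (some k) cs hrest ⟨by omega, fun j h1 h2 => ?_, ?_⟩ a b hm
        · have hj : j = k := by omega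
          rw [hj, hwc]; exact hw
        · exact hinv
      · rw [pvRuns, if_neg hw] at hm
        refine ih (k+1) none cs hrest ?_ a b hm
        exact Or.inr (by simpa [hwc] using hw)
    | some s =>
      obtain ⟨hs, hwj, hb⟩ := hinv
      by_cases hw : pvWord c
      · rw [pvRuns, if_pos hw] at hm
        refine ih (k+1) (some s) cs hrest ?_ a b hm
        refine ⟨by omega, fun j h1 h2 => ?_, hb⟩
        by_cases hj : j < k
        · exact hwj j h1 hj
        · have hj2 : j = k := by omega
          rw [hj2, hwc]; exact hw
      · rw [pvRuns, if_neg hw] at hm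
        rcases List.mem_cons.mp hm with heq | hm
        · have hab : a = s ∧ b = k := by simpa using heq
          have hkl : k ≤ cs.length := by
            have := pvW_lt (hwj (k-1) (by omega) (by omega)); omega
          rw [hab.1, hab.2]
          exact ⟨hs, hkl, hwj, hb, Or.inr (by simpa [hwc] using hw)⟩
        · refine ih (k+1) none cs hrest ?_ a b hm
          exact Or.inr (by simpa [hwc] using hw)

theorem runs_complete : ∀ (suf : List Char) (k : Nat) (run : Option Nat) (idx : Nat),
    (∀ s, run = some s → s ≤ k) →
    ((∃ s, run = some s ∧ s ≤ idx ∧ idx < k) ∨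
      (k ≤ idx ∧ idx < k + suf.length ∧ pvWord (suf.getD (idx - k) ' ') = true)) →
    ∃ a b, (a, b) ∈ pvRuns suf k run ∧ a ≤ idx ∧ idx < b := by
  intro suf
  induction suf with
  | nil =>
    intro k run idx hr hcov
    rcases hcov with ⟨s, rfl, h1, h2⟩ | ⟨h1, h2, _⟩
    · exact ⟨s, k, by simp [pvRuns], h1, h2⟩
    · simp at h2; omega
  | cons c rest ih =>
    intro k run idx hr hcov
    cases run with
    | none =>
      rcases hcov with ⟨s, hs, _⟩ | ⟨h1, h2, h3⟩
      · simp at hs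
      by_cases hik : idx = k
      · have h3k : pvWord c = true := by
          rw [hik] at h3; simpa using h3
        rw [pvRuns, if_pos h3k]
        exact ih (k+1) (some k) idx (by simp) (Or.inl ⟨k, rfl, by omega, by omega⟩)
      · have hgt : k < idx := by omega
        have h3' : pvWord (rest.getD (idx - (k+1)) ' ') = true := by
          have : idx - k = (idx - (k+1)) + 1 := by omega
          rw [this] at h3; simpa using h3
        by_cases hw : pvWord c
        · rw [pvRuns, if_pos hw]
          exact ih (k+1) (some k) idx (by simp) (Or.inr ⟨by omega, by simp at h2 ⊢; omega, h3'⟩)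
        · rw [pvRuns, if_neg hw]
          exact ih (k+1) none idx (by simp) (Or.inr ⟨by omega, by simp at h2 ⊢; omega, h3'⟩)
    | some s =>
      have hsk : s ≤ k := hr s rfl
      rcases hcov with ⟨s', hs', h1, h2⟩ | ⟨h1, h2, h3⟩
      · have hss : s' = s := by injection hs' with h; omega
        rw [hss] at h1
        by_cases hw : pvWord c
        · rw [pvRuns, if_pos hw]
          exact ih (k+1) (some s) idx (fun t ht => by injection ht with h; omega)
            (Or.inl ⟨s, rfl, h1, by omega⟩)
        · rw [pvRuns, if_neg hw]
          exact ⟨s, k, List.mem_cons_self, h1, h2⟩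
      · by_cases hik : idx = k
        · have h3k : pvWord c = true := by
            rw [hik] at h3; simpa using h3
          rw [pvRuns, if_pos h3k]
          exact ih (k+1) (some s) idx (fun t ht => by injection ht with h; omega)
            (Or.inl ⟨s, rfl, by omega, by omega⟩)
        · have h3' : pvWord (rest.getD (idx - (k+1)) ' ') = true := by
            have : idx - k = (idx - (k+1)) + 1 := by omega
            rw [this] at h3; simpa using h3
          by_cases hw : pvWord c
          · rw [pvRuns, if_pos hw]
            exact ih (k+1) (some s) idx (fun t ht => by injection ht with h; omega)
              (Or.inr ⟨by omega, by simp at h2 ⊢; omega, h3'⟩)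
          · rw [pvRuns, if_neg hw]
            refine (ih (k+1) none idx (by simp) (Or.inr ⟨by omega, by simp at h2 ⊢; omega, h3'⟩)).imp ?_
            intro a h; exact h.imp fun b hb => ⟨List.mem_cons_of_mem _ hb.1, hb.2⟩

theorem maxRun_unique {cs : List Char} {a b a' b' idx : Nat}
    (h1 : pvMaxRun cs a b) (h2 : pvMaxRun cs a' b') (ha : a ≤ idx) (hb : idx < b)
    (ha' : a' ≤ idx) (hb' : idx < b') : a = a' ∧ b = b' := by
  obtain ⟨hab, hbl, hw1, hl1, hr1⟩ := h1
  obtain ⟨hab', hbl', hw1', hl1', hr1'⟩ := h2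
  constructor
  · rcases Nat.lt_trichotomy a a' with h | h | h
    · rcases hl1' with rfl | hf
      · omega
      · have := hw1 (a' - 1) (by omega) (by omega); rw [hf] at this; exact absurd this (by simp)
    · exact h
    · rcases hl1 with rfl | hf
      · omega
      · have := hw1' (a - 1) (by omega) (by omega); rw [hf] at this; exact absurd this (by simp)
  · rcases Nat.lt_trichotomy b b' with h | h | h
    · rcases hr1 with rfl | hf
      · omega
      · have := hw1' b (by omega) (by omega); rw [hf] at this; exact absurd this (by simp)
    · exact h
    · rcases hr1' with rfl | hf
      · omega
      · have := hw1 b' (by omega) (by omega); rw [hf] at this; exact absurd this (by simp)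
theorem startLoop_le (cs : List Char) (i : Nat) : pvStartLoop cs i ≤ i := by
  induction i with
  | zero => simp [pvStartLoop]
  | succ n ih => rw [pvStartLoop]; split <;> omega

theorem startLoop_word (cs : List Char) (i : Nat) :
    ∀ j, pvStartLoop cs i ≤ j → j < i → pvW cs j = true := by
  induction i with
  | zero => intro j h1 h2; omega
  | succ n ih =>
    intro j h1 h2
    rw [pvStartLoop] at h1
    by_cases hw : pvWord (cs.getD n ' ')
    · rw [if_pos hw] at h1
      by_cases hj : j < n
      · exact ih j h1 hj
      · have : j = n := by omega
        rw [this]; exact hw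
    · rw [if_neg hw] at h1; omega

theorem startLoop_bound (cs : List Char) (i : Nat) :
    pvStartLoop cs i = 0 ∨ pvW cs (pvStartLoop cs i - 1) = false := by
  induction i with
  | zero => exact Or.inl rfl
  | succ n ih =>
    rw [pvStartLoop]
    by_cases hw : pvWord (cs.getD n ' ')
    · rw [if_pos hw]; exact ih
    · rw [if_neg hw]; right; simpa [pvW] using hw

theorem endLoop_ge (cs : List Char) (e : Nat) : e ≤ pvEndLoop cs e := by
  fun_induction pvEndLoop cs e with
  | case1 e h ih => omega
  | case2 e h => omega

theorem endLoop_le_len (cs : List Char) (e : Nat) (h0 : e ≤ cs.length) :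
    pvEndLoop cs e ≤ cs.length := by
  fun_induction pvEndLoop cs e with
  | case1 e h ih => exact ih (by omega)
  | case2 e h => omega

theorem endLoop_word (cs : List Char) (e : Nat) :
    ∀ j, e ≤ j → j < pvEndLoop cs e → pvW cs j = true := by
  fun_induction pvEndLoop cs e with
  | case1 e h ih =>
    intro j h1 h2
    by_cases hj : e < j
    · exact ih j (by omega) h2
    · have : j = e := by omega
      rw [this]; exact h.2
  | case2 e h => intro j h1 h2; omega

theorem endLoop_bound (cs : List Char) (e : Nat) (h0 : e ≤ cs.length) :
    pvEndLoop cs e = cs.length ∨ pvW cs (pvEndLoop cs e) = false := by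
  fun_induction pvEndLoop cs e with
  | case1 e h ih => exact ih (by omega)
  | case2 e h =>
    by_cases hl : e < cs.length
    · right
      have : ¬ pvWord (cs.getD e ' ') := fun hw => h ⟨hl, hw⟩
      simpa [pvW] using this
    · left; omega

theorem core_find (cs : List Char) (idx : Nat) (hlt : idx < cs.length) (hw : pvW cs idx = true) :
    (pvSpans cs).find? (fun p => decide (p.1 ≤ (idx : Int)) && decide ((idx : Int) < p.2)) =
      some ((pvStartLoop cs idx : Int), (pvEndLoop cs (idx + 1) : Int)) := by
  rw [pvSpans_eq, List.find?_map]
  have hcomp : ∃ a b, (a, b) ∈ pvRuns cs 0 none ∧ a ≤ idx ∧ idx < b := by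
    refine runs_complete cs 0 none idx (by simp) (Or.inr ⟨by omega, by omega, ?_⟩)
    simpa [pvW, Nat.sub_zero] using hw
  obtain ⟨a, b, hm, ha, hb⟩ := hcomp
  have hsome : ((pvRuns cs 0 none).find?
      ((fun p => decide (p.1 ≤ (idx : Int)) && decide ((idx : Int) < p.2)) ∘
        (fun p : Nat × Nat => ((p.1 : Int), (p.2 : Int))))).isSome := by
    rw [List.find?_isSome]
    exact ⟨(a, b), hm, by simp; exact ⟨by exact_mod_cast ha, by exact_mod_cast hb⟩⟩
  obtain ⟨q, hq⟩ := Option.isSome_iff_exists.mp hsome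
  have hqmem := List.mem_of_find?_eq_some hq
  have hqp := List.find?_some hq
  simp only [Function.comp] at hqp
  have hq1 : q.1 ≤ idx := by
    have := (Bool.and_eq_true _ _ ▸ hqp).1; simpa using this
  have hq2 : idx < q.2 := by
    have := (Bool.and_eq_true _ _ ▸ hqp).2; simpa using this
  have hmaxq : pvMaxRun cs q.1 q.2 := runs_sound cs 0 none cs (by simp) (Or.inl rfl) q.1 q.2 (by simpa using hqmem)
  have hmaxA : pvMaxRun cs (pvStartLoop cs idx) (pvEndLoop cs (idx + 1)) := by
    refine ⟨?_, endLoop_le_len cs (idx+1) (by omega), ?_, startLoop_bound cs idx, endLoop_bound cs (idx+1) (by omega)⟩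
    · have h1 := startLoop_le cs idx
      have h2 := endLoop_ge cs (idx+1)
      omega
    · intro j h1 h2
      by_cases hj : j < idx
      · exact startLoop_word cs idx j h1 hj
      · by_cases hj2 : j = idx
        · rw [hj2]; exact hw
        · exact endLoop_word cs (idx+1) j (by omega) h2
  have := maxRun_unique hmaxq hmaxA hq1 hq2 (startLoop_le cs idx) (Nat.lt_of_lt_of_le (Nat.lt_succ_self idx) (endLoop_ge cs (idx+1)))
  rw [hq]
  simp [this.1, this.2]
theorem core_find_int (cs : List Char) (i : Int) (h0 : 0 ≤ i) (hlt : i < (cs.length : Int))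
    (hw : pvWord (PySem.List.pyGetD cs i ' ') = true) :
    (pvSpans cs).find? (fun p => decide (p.1 ≤ i) && decide (i < p.2)) =
      some ((pvStartLoop cs i.toNat : Int), (pvEndLoop cs (i.toNat + 1) : Int)) := by
  have hi : i = ((i.toNat : Nat) : Int) := (Int.toNat_of_nonneg h0).symm
  have hltN : i.toNat < cs.length := by omega
  have hwN : pvW cs i.toNat = true := by
    rw [hi, PySem.List.pyGetD_natCast] at hw
    exact hw
  rw [hi]
  exact core_find cs i.toNat hltN hwN

theorem main_eq (code : String) (line : Int) (column : Int) :
    identifier_at_position_py code line column = identifier_at_position_py_alt code line column := by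
  unfold identifier_at_position_py identifier_at_position_py_alt
  by_cases h0 : (pvLineText code line).length = 0
  · simp [h0]
  · have hlen : 0 < (pvLineText code line).length := Nat.pos_of_ne_zero h0
    have hc1 : (1 : Int) ≤ ((pvLineText code line).length : Int) := by exact_mod_cast hlen
    set cs := pvLineText code line with hcs
    set I : Int := min (max (column - 1) 0) ((cs.length : Int) - 1) with hI
    have hI0 : 0 ≤ I := by rw [hI]; omega
    have hIlt : I < (cs.length : Int) := by rw [hI]; omega
    by_cases hw1 : pvWord (PySem.List.pyGetD cs I ' ')
    · simp [h0, ← hI, hw1, core_find_int cs I hI0 hIlt hw1]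
    · by_cases hw2 : 0 < I ∧ pvWord (PySem.List.pyGetD cs (I - 1) ' ') = true
      · have h20 : 0 ≤ I - 1 := by omega
        have h2lt : I - 1 < (cs.length : Int) := by omega
        have hfind := core_find_int cs (I - 1) h20 h2lt hw2.2
        simp [h0, ← hI, hw1, hw2.1, hw2.2] at hfind ⊢
        rw [hfind]
      · simp [h0, ← hI, hw1, hw2]

-- ===== VERDICT (by name: the statement is the Claim_ definition above) =====
theorem identifier_at_position_py_spec : Claim_equal_identifier_at_position_py := by
  intro code line column _ _
  exact main_eq code line column
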